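-- pv_equiv track=rewrite | github.com/schemathesis/schemathesis | src/schemathesis/code_samples.py | _escape_single_quotes
-- ===== SOURCE A (Python) =====
-- def _escape_single_quotes(url: str) -> str:
--     """Escape single quotes in a string, so it is usable as in generated Python code.
--
--     The usual ``str.replace`` is not suitable as it may convert already escaped quotes to not-escaped.
--     """
--     result = []
--     escape = False
--     for char in url:
--         if escape:
--             result.append(char)
--             escape = False
--         elif char == "\\":
--             result.append(char)
--             escape = True
--         elif char == "'":
--             result.append("\\'")
--         else:
--             result.append(char)
--     return "".join(result)
-- ===== SOURCE B (Python) =====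
-- def _escape_single_quotes(url: str) -> str:
--     """Tokenizing scan: consume a backslash + following char as one unit,
--     turn a bare single quote into \\', copy anything else."""
--     out = []
--     i, n = 0, len(url)
--     while i < n:
--         c = url[i]
--         if c == "\\":
--             out.append(url[i:i + 2])  # pair (or lone trailing backslash) kept verbatim
--             i += 2
--         elif c == "'":
--             out.append("\\'")
--             i += 1
--         else:
--             out.append(c)
--             i += 1
--     return "".join(out)
-- ===== Notes on version B (the rewrite author's own statement) =====
-- stated objective: idiomatic
-- what changed: Replaces the boolean escape-flag state machine with a tokenizing scan that consumes a backslash-escape pair as a single unit (index jumps by 2) and rewrites only bare quotes.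
import Mathlib
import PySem

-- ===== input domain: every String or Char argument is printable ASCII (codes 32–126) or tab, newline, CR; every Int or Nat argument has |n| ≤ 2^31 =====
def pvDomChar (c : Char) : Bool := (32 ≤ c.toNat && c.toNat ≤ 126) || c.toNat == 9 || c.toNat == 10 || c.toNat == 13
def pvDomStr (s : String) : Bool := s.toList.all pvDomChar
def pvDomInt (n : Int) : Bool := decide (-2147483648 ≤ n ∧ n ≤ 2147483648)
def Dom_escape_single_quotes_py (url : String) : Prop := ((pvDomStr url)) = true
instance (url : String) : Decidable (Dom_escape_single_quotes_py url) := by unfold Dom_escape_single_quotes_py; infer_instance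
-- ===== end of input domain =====

-- B replaces A's boolean escape-flag state machine by a tokenizing scan that
-- consumes each backslash-escape pair as one unit; return values are proved equal.

-- ===== PORT A =====
-- one step of A's for-loop: state = (accumulated chars, escape flag)
def pvAStep (st : List Char × Bool) (c : Char) : List Char × Bool :=
  if st.2 then (st.1 ++ [c], false)
  else if c = '\\' then (st.1 ++ [c], true)
  else if c = '\'' then (st.1 ++ ['\\', '\''], false)
  else (st.1 ++ [c], false)

def escape_single_quotes_py (url : String) : String :=
  ((url.toList.foldl pvAStep ([], false)).1)  |> String.ofList

-- ===== PORT B =====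
-- tokenizing scan: backslash consumes the next char too (a lone trailing
-- backslash is copied verbatim); a bare quote becomes \'; others are copied.
def pvBGo : List Char → List Char
  | [] => []
  | [c] => if c = '\'' then ['\\', '\''] else [c]
  | c :: d :: rest =>
    if c = '\\' then '\\' :: d :: pvBGo rest
    else if c = '\'' then '\\' :: '\'' :: pvBGo (d :: rest)
    else c :: pvBGo (d :: rest)

def escape_single_quotes_py_alt (url : String) : String :=
  (pvBGo url.toList)  |> String.ofList

-- ===== PRECONDITION & SPEC =====
def Spec_escape_single_quotes_py (url : String) (out : String) : Prop := out = escape_single_quotes_py_alt url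
instance (url : String) (out : String) : Decidable (Spec_escape_single_quotes_py url out) := by unfold Spec_escape_single_quotes_py; infer_instance

-- ===== CLAIM (what is proved, stated in full; the proofs are below) =====
def Claim_equal_escape_single_quotes_py : Prop := ∀ (url : String), Dom_escape_single_quotes_py url → Spec_escape_single_quotes_py url (escape_single_quotes_py url)

-- ===== LEMMAS AND PROOFS =====

-- loop invariant: from escape = false, A's fold appends exactly B's token output
theorem pvKey : ∀ (l acc : List Char),
    (l.foldl pvAStep (acc, false)).1 = acc ++ pvBGo l
  | [], acc => by simp [pvBGo]
  | [c], acc => by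
    by_cases h1 : c = '\\'
    · simp [pvAStep, pvBGo, h1]
    · by_cases h2 : c = '\''
      · simp [pvAStep, pvBGo, h2]
      · simp [pvAStep, pvBGo, h1, h2]
  | c :: d :: rest, acc => by
    by_cases h1 : c = '\\'
    · have := pvKey rest (acc ++ ['\\', d])
      simp [pvAStep, pvBGo, h1, List.foldl, this]
    · by_cases h2 : c = '\''
      · have := pvKey (d :: rest) (acc ++ ['\\', '\''])
        simp only [List.append_assoc, List.cons_append, List.nil_append] at this
        simpa [List.foldl, pvAStep, pvBGo, h1, h2] using this
      · have := pvKey (d :: rest) (acc ++ [c])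
        simp only [List.append_assoc, List.cons_append, List.nil_append] at this
        simpa [List.foldl, pvAStep, pvBGo, h1, h2] using this

-- ===== VERDICT (by name: the statement is the Claim_ definition above) =====
theorem escape_single_quotes_py_spec : Claim_equal_escape_single_quotes_py := by
  intro url _
  unfold Spec_escape_single_quotes_py escape_single_quotes_py escape_single_quotes_py_alt
  rw [pvKey url.toList []]
  simp
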